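-- pv_equiv track=rewrite | github.com/bifurcate/mixed-platonic | src/binary_loop.py | foo
-- ===== SOURCE A (Python) =====
-- def foo(x):
--     count = 1
--     parity = 0
--     for i in range(1, len(x)):
--         if x[i] == 1:
--             parity = (parity + 1) % 2
--         if parity == 0:
--             count += 1
--     return count
-- ===== SOURCE B (Python) =====
-- def foo(x):
--     n = len(x)
--     ones = [i for i, v in enumerate(x[1:], 1) if v == 1]
--     b = ones + [n]
--     total = 1 + (b[0] - 1 if n > 0 else 0)
--     for k in range(1, len(ones), 2):
--         total += b[k + 1] - b[k]
--     return total
-- ===== Notes on version B (the rewrite author's own statement) =====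
-- stated objective: alternative
-- what changed: Instead of tracking a running parity over every index, B collects the positions of 1s once and computes the answer as 1 plus the total length of the even-parity runs delimited by consecutive 1-positions (an alternating gap sum over the boundary list).
import Mathlib
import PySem

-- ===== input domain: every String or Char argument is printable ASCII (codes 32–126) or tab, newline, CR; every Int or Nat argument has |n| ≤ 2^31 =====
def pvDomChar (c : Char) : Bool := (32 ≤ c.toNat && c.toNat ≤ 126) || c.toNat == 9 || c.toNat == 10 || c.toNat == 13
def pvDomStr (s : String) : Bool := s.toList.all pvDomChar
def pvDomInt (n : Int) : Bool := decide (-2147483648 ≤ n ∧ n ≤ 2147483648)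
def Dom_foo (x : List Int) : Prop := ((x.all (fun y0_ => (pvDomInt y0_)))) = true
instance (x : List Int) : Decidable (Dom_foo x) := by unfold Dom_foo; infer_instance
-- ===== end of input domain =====

-- B replaces the running-parity loop by a one-pass collection of the 1-positions and an
-- alternating gap sum over those segment boundaries (different decomposition, same O(n) cost).

-- ===== PORT A =====
def foo (x : List Int) : Int :=
  ((PySem.List.pyRange 1 (x.length : Int) 1).foldl
    (fun (s : Int × Int) i =>
      let parity := if PySem.List.pyGetD x i 0 = 1 then PySem.Int.mod (s.2 + 1) 2 else s.2
      let count := if parity = 0 then s.1 + 1 else s.1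
      (count, parity)) (1, 0)).1

-- ===== PORT B =====
def foo_alt (x : List Int) : Int :=
  let n : Int := (x.length : Int)
  let ones : List Int :=
    ((PySem.List.enumerate (PySem.List.slice x (some 1) none) 1).filter
      (fun p => p.2 == 1)).map (·.1)
  let b := ones ++ [n]
  let total : Int := 1 + (if n > 0 then PySem.List.pyGetD b 0 0 - 1 else 0)
  (PySem.List.pyRange 1 (ones.length : Int) 2).foldl
    (fun t k => t + (PySem.List.pyGetD b (k + 1) 0 - PySem.List.pyGetD b k 0)) total

-- ===== PRECONDITION & SPEC =====
def Spec_foo (x : List Int) (out : Int) : Prop := out = foo_alt x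
instance (x : List Int) (out : Int) : Decidable (Spec_foo x out) := by unfold Spec_foo; infer_instance

-- ===== CLAIM (what is proved, stated in full; the proofs are below) =====
def Claim_equal_foo : Prop := ∀ (x : List Int), Dom_foo x → Spec_foo x (foo x)

-- ===== LEMMAS AND PROOFS =====

-- positions (from start index s) of the entries equal to 1
def onesPos : List Int → Int → List Int
  | [], _ => []
  | a :: t, s => if a = 1 then s :: onesPos t (s + 1) else onesPos t (s + 1)

-- A's loop body abstracted over the element value
def stepA (s : Int × Int) (a : Int) : Int × Int :=
  let parity := if a = 1 then PySem.Int.mod (s.2 + 1) 2 else s.2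
  let count := if parity = 0 then s.1 + 1 else s.1
  (count, parity)

-- number of positions with even running 1-count, starting from parity p
def cnt : List Int → Int → Int
  | [], _ => 0
  | a :: t, p =>
      let p' := if a = 1 then PySem.Int.mod (p + 1) 2 else p
      (if p' = 0 then 1 else 0) + cnt t p'

-- alternating gap sum over a boundary list: alt false = gaps at odd index, alt true = gaps at even index
def alt : Bool → List Int → Int
  | _, [] => 0
  | bl, a :: l => (if bl then l.headD a - a else 0) + alt (!bl) l

theorem foldlA_fst (t : List Int) (c p : Int) :
    (t.foldl stepA (c, p)).1 = c + cnt t p := by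
  induction t generalizing c p with
  | nil => simp [cnt]
  | cons a t ih =>
    simp only [List.foldl_cons, cnt, stepA]
    by_cases h : a = 1 <;> simp only [h, if_true, if_false] <;>
      split_ifs with h2 <;> simp [ih, h2] <;> ring

theorem ones_eq (t : List Int) (s : Int) :
    ((PySem.List.enumerate t s).filter (fun p => p.2 == 1)).map (·.1) = onesPos t s := by
  induction t generalizing s with
  | nil => simp [PySem.List.enumerate_nil, onesPos]
  | cons a t ih =>
    rw [PySem.List.enumerate_cons]
    by_cases h : a = 1 <;> simp [onesPos, h, ih]

theorem cnt_alt (t : List Int) (s : Int) :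
    cnt t 0 = (onesPos t s ++ [s + (t.length : Int)]).headD 0 - s
              + alt false (onesPos t s ++ [s + (t.length : Int)])
    ∧ cnt t 1 = alt true (onesPos t s ++ [s + (t.length : Int)]) := by
  induction t generalizing s with
  | nil => simp [cnt, onesPos, alt]
  | cons a t ih =>
    have h1 : s + ((a :: t).length : Int) = (s + 1) + (t.length : Int) := by
      simp only [List.length_cons]; push_cast; ring
    by_cases h : a = 1
    · -- ones list gains s at the front
      have hb : onesPos (a :: t) s ++ [s + ((a :: t).length : Int)]
          = s :: (onesPos t (s + 1) ++ [(s + 1) + (t.length : Int)]) := by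
        simp [onesPos, h]; omega
      constructor
      · rw [hb]
        have : cnt (a :: t) 0 = cnt t 1 := by
          simp [cnt, h]
        rw [this, (ih (s + 1)).2]
        simp [alt]
      · rw [hb]
        have : cnt (a :: t) 1 = 1 + cnt t 0 := by
          simp [cnt, h]
        rw [this, (ih (s + 1)).1]
        have hne : onesPos t (s + 1) ++ [(s + 1) + (t.length : Int)] ≠ [] := by simp
        simp only [alt, if_true, Bool.not_true]
        rcases hx : onesPos t (s + 1) ++ [(s + 1) + (t.length : Int)] with _ | ⟨u, l⟩
        · exact absurd hx hne
        · simp [hx, alt] at *; omega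
    · have hb : onesPos (a :: t) s ++ [s + ((a :: t).length : Int)]
          = onesPos t (s + 1) ++ [(s + 1) + (t.length : Int)] := by
        simp [onesPos, h]; omega
      constructor
      · have : cnt (a :: t) 0 = 1 + cnt t 0 := by simp [cnt, h]
        rw [hb, this, (ih (s + 1)).1]; ring
      · have : cnt (a :: t) 1 = cnt t 1 := by simp [cnt, h]
        rw [hb, this, (ih (s + 1)).2]

-- B's step-2 index fold over the boundary list is the alternating gap sum
theorem gap_fold : ∀ (m : Nat) (l : List Int), l.length = m → ∀ (a t0 : Int),
    (List.range (l.length / 2)).foldl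
      (fun t k => t + ((a :: l).getD (2 * k + 2) 0 - (a :: l).getD (2 * k + 1) 0)) t0
    = t0 + alt false (a :: l) := by
  intro m
  induction m using Nat.strong_induction_on with
  | _ m ih =>
    intro l hm a t0
    match l with
    | [] => simp [alt]
    | [v] => simp [alt]
    | v :: w :: rest =>
      have hlen : (v :: w :: rest).length / 2 = rest.length / 2 + 1 := by
        simp only [List.length_cons]; omega
      rw [hlen, List.range_succ_eq_map, List.foldl_cons, List.foldl_map]
      simp only [Nat.succ_eq_add_one]
      have hbody : (fun (t : Int) (k : Nat) =>
          t + ((a :: v :: w :: rest).getD (2 * (k + 1) + 2) 0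
             - (a :: v :: w :: rest).getD (2 * (k + 1) + 1) 0))
          = (fun (t : Int) (k : Nat) =>
          t + ((w :: rest).getD (2 * k + 2) 0 - (w :: rest).getD (2 * k + 1) 0)) := by
        funext t k
        have e1 : 2 * (k + 1) + 2 = (2 * k + 2) + 2 := by omega
        have e2 : 2 * (k + 1) + 1 = (2 * k + 1) + 2 := by omega
        simp [e1, e2]
      rw [hbody, ih rest.length (by subst hm; simp) rest rfl w _]
      have halt : alt false (a :: v :: w :: rest) = w - v + alt false (w :: rest) := by
        simp [alt]
      have g2 : (a :: v :: w :: rest).getD 2 0 = w := rfl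
      have g1 : (a :: v :: w :: rest).getD 1 0 = v := rfl
      rw [halt, g2, g1]
      ring

theorem range2_eq (m : Nat) : PySem.List.pyRange 1 (m : Int) 2
    = (List.range (m / 2)).map (fun k : Nat => (1 : Int) + 2 * (k : Int)) := by
  rw [PySem.List.pyRange_of_pos _ _ (by norm_num)]
  congr 1
  congr 1
  by_cases h1 : (1 : Int) < (m : Int)
  · rw [if_pos h1]; omega
  · rw [if_neg h1]; omega

theorem foo_alt_eq (x : List Int) :
    foo_alt x = 1 + cnt x.tail 0 := by
  unfold foo_alt
  simp only [PySem.List.slice_from_one, ones_eq]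
  set O := onesPos x.tail 1 with hO
  set n : Int := (x.length : Int) with hn
  rw [range2_eq, List.foldl_map]
  have hbody : (fun (t : Int) (k : Nat) =>
        t + (PySem.List.pyGetD (O ++ [n]) ((1 : Int) + 2 * (k : Int) + 1) 0
           - PySem.List.pyGetD (O ++ [n]) ((1 : Int) + 2 * (k : Int)) 0))
      = (fun (t : Int) (k : Nat) =>
        t + ((O ++ [n]).getD (2 * k + 2) 0 - (O ++ [n]).getD (2 * k + 1) 0)) := by
    funext t k
    have e1 : (1 : Int) + 2 * (k : Int) + 1 = ((2 * k + 2 : Nat) : Int) := by push_cast; ring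
    have e2 : (1 : Int) + 2 * (k : Int) = ((2 * k + 1 : Nat) : Int) := by push_cast; ring
    rw [e1, e2, PySem.List.pyGetD_natCast, PySem.List.pyGetD_natCast]
  obtain ⟨h0, l, hx⟩ := List.exists_cons_of_ne_nil (by simp : O ++ [n] ≠ [])
  have hlens : O.length = l.length := by
    have := congrArg List.length hx
    simpa using this
  rw [hx] at hbody ⊢
  rw [hlens, hbody, gap_fold l.length l rfl h0 _]
  rw [PySem.List.pyGetD_zero]
  rcases Nat.eq_zero_or_pos x.length with hz | hp
  · -- empty input: O = [], n = 0, boundary list is [0]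
    have hxnil : x = [] := List.length_eq_zero_iff.mp hz
    subst hxnil
    simp only [hO, hn, List.tail_nil, onesPos, List.length_nil, Nat.cast_zero,
      List.nil_append] at hx ⊢
    obtain ⟨rfl, rfl⟩ := by simpa using hx
    simp [alt, cnt]
  · have hmain := (cnt_alt x.tail 1).1
    have hlen : (1 : Int) + (x.tail.length : Int) = n := by
      rw [hn]; simp [List.length_tail]; omega
    rw [hlen, ← hO, hx] at hmain
    have hngt : n > 0 := by rw [hn]; exact_mod_cast hp
    rw [if_pos hngt]
    simp only [List.getD, List.headD] at *
    simp at hmain ⊢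
    omega

theorem foo_eq (x : List Int) : foo x = 1 + cnt x.tail 0 := by
  unfold foo
  have h : (fun (s : Int × Int) (i : Int) =>
      let parity := if PySem.List.pyGetD x i 0 = 1 then PySem.Int.mod (s.2 + 1) 2 else s.2
      let count := if parity = 0 then s.1 + 1 else s.1
      (count, parity))
      = (fun (s : Int × Int) (i : Int) => stepA s (PySem.List.pyGetD x i 0)) := by
    funext s i; simp [stepA]
  rw [h]
  have := PySem.List.foldl_pyRange_pyGetD x 0 stepA ((1 : Int), (0 : Int)) (a := 1) (by norm_num)
  simp only [PySem.List.len] at this ⊢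
  rw [this]
  rw [show ((1 : Int).toNat) = 1 from rfl, List.drop_one]
  exact foldlA_fst x.tail 1 0

-- ===== VERDICT (by name: the statement is the Claim_ definition above) =====
theorem foo_spec : Claim_equal_foo := by
  intro x _
  unfold Spec_foo
  rw [foo_eq, foo_alt_eq]
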